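-- pv_equiv track=rewrite | github.com/astudilloalex/python-utils | utils/excel/months.py | detect_month_columns
-- ===== SOURCE A (Python) =====
-- from typing import List
--
-- DEFAULT_ALIASES = [
--     # English full
--     "january","february","march","april","may","june","july","august","september","october","november","december",
--     # English short
--     "jan","feb","mar","apr","may","jun","jul","aug","sep","sept","oct","nov","dec",
--     # Spanish full
--     "enero","febrero","marzo","abril","mayo","junio","julio","agosto","septiembre","octubre","noviembre","diciembre",
--     # Spanish short
--     "ene","feb","mar","abr","may","jun","jul","ago","sep","set","oct","nov","dic",
-- ]
--
-- def detect_month_columns(columns: List[str], aliases: List[str] = None) -> List[str]: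
--     aliases = aliases or DEFAULT_ALIASES
--     found: List[str] = []
--     for c in columns:
--         cl = str(c).strip().lower()
--         if any(
--             cl == a or cl.startswith(a + " ") or cl.endswith(" " + a) or cl.startswith(a + "_") or cl.endswith("_" + a)
--             for a in aliases
--         ):
--             found.append(c)
--     return found
-- ===== SOURCE B (Python) =====
-- from typing import List
--
-- DEFAULT_ALIASES = [
--     "january","february","march","april","may","june","july","august","september","october","november","december",
--     "jan","feb","mar","apr","may","jun","jul","aug","sep","sept","oct","nov","dec",
--     "enero","febrero","marzo","abril","mayo","junio","julio","agosto","septiembre","octubre","noviembre","diciembre",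
--     "ene","feb","mar","abr","may","jun","jul","ago","sep","set","oct","nov","dic",
-- ]
--
-- def detect_month_columns(columns: List[str], aliases: List[str] = None) -> List[str]:
--     # One hash-set of aliases; per column generate the candidate substrings that the
--     # boundary rules could ever match (whole string, prefix before each ' '/'_',
--     # suffix after each ' '/'_') and test them against the set.
--     alias_set = set(aliases if aliases else DEFAULT_ALIASES)
--     found: List[str] = []
--     for c in columns:
--         cl = str(c).strip().lower()
--         cands = [cl]
--         for i, ch in enumerate(cl):
--             if ch == ' ' or ch == '_':
--                 cands.append(cl[:i])
--                 cands.append(cl[i+1:])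
--         if any(x in alias_set for x in cands):
--             found.append(c)
--     return found
-- ===== Notes on version B (the rewrite author's own statement) =====
-- stated objective: alternative
-- what changed: Instead of testing every alias against the column with five string operations, B builds one hash-set of the aliases and, per column, generates the candidate substrings the boundary rules could match (whole string, prefix before each ' '/'_', suffix after each ' '/'_') and tests those against the set.
import Mathlib
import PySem

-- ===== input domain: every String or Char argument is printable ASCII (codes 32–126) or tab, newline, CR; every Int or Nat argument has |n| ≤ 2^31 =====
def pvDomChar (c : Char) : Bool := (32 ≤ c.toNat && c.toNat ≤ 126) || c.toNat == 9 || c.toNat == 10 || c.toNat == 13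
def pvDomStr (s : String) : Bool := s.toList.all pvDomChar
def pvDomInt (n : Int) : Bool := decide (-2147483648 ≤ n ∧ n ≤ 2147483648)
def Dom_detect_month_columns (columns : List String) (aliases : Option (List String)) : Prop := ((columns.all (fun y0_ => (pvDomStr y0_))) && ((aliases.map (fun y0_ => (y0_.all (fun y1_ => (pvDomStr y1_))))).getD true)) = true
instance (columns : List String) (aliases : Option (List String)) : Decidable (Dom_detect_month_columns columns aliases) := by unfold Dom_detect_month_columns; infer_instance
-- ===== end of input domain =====

-- B resolves aliases the same way, then tests each normalized column's boundary candidates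
-- (whole string, prefix before / suffix after each ' ' or '_') against one alias hash-set,
-- removing the per-alias inner scan (objective: alternative).


-- module constant DEFAULT_ALIASES (shared by A and B, as in the Python module)
def DEFAULT_ALIASES : List String :=
  ["january","february","march","april","may","june","july","august","september","october","november","december",
   "jan","feb","mar","apr","may","jun","jul","aug","sep","sept","oct","nov","dec",
   "enero","febrero","marzo","abril","mayo","junio","julio","agosto","septiembre","octubre","noviembre","diciembre",
   "ene","feb","mar","abr","may","jun","jul","ago","sep","set","oct","nov","dic"]

-- ===== PORT A =====
def detect_month_columns (columns : List String) (aliases : Option (List String)) : List String :=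
  -- aliases = aliases or DEFAULT_ALIASES  (None or empty list falls back)
  let al := match aliases with
    | none => DEFAULT_ALIASES
    | some l => if l = [] then DEFAULT_ALIASES else l
  columns.foldl (fun found c =>
    let cl := PySem.Chars.lower (PySem.Chars.strip c.toList)
    if al.any (fun a =>
        let b := a.toList
        cl == b || PySem.Chars.startswith cl (b ++ [' ']) || PySem.Chars.endswith cl ([' '] ++ b)
          || PySem.Chars.startswith cl (b ++ ['_']) || PySem.Chars.endswith cl (['_'] ++ b))
    then found ++ [c] else found) []

-- ===== PORT B =====
-- candidates of cl: [cl] plus, for each i with cl[i] in {' ','_'}, cl[:i] and cl[i+1:]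
def pvCandidates (cl : List Char) : List (List Char) :=
  (PySem.List.enumerate cl).foldl (fun cs p =>
    if p.2 == ' ' || p.2 == '_' then
      cs ++ [PySem.List.slice cl none (some p.1)] ++ [PySem.List.slice cl (some (p.1 + 1)) none]
    else cs) [cl]

def detect_month_columns_alt (columns : List String) (aliases : Option (List String)) : List String :=
  -- 'aliases if aliases else DEFAULT_ALIASES': a non-empty given list is used, anything else falls back
  let al := match aliases with
    | some (a :: rest) => a :: rest
    | _ => DEFAULT_ALIASES
  -- set of alias strings, represented by their code-point lists (String.toList is injective)
  let aset : PySem.Set (List Char) := PySem.Set.ofList (al.map String.toList)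
  columns.foldl (fun found c =>
    let cl := PySem.Chars.lower (PySem.Chars.strip c.toList)
    if (pvCandidates cl).any (fun x => PySem.Set.contains aset x)
    then found ++ [c] else found) []

-- ===== PRECONDITION & SPEC =====
def Spec_detect_month_columns (columns : List String) (aliases : Option (List String)) (out : List String) : Prop := out = detect_month_columns_alt columns aliases
instance (columns : List String) (aliases : Option (List String)) (out : List String) : Decidable (Spec_detect_month_columns columns aliases out) := by unfold Spec_detect_month_columns; infer_instance

-- ===== CLAIM (what is proved, stated in full; the proofs are below) =====
def Claim_equal_detect_month_columns : Prop := ∀ (columns : List String) (aliases : Option (List String)), Dom_detect_month_columns columns aliases → Spec_detect_month_columns columns aliases (detect_month_columns columns aliases)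

-- ===== LEMMAS AND PROOFS =====

lemma pvCandidates_eq (cl : List Char) :
    pvCandidates cl = [cl] ++ (PySem.List.enumerate cl).flatMap
      (fun p => if p.2 == ' ' || p.2 == '_' then [PySem.List.slice cl none (some p.1), PySem.List.slice cl (some (p.1 + 1)) none] else []) := by
  unfold pvCandidates
  rw [PySem.List.foldl_congr_mem
      (g := fun cs p => cs ++ (if p.2 == ' ' || p.2 == '_' then [PySem.List.slice cl none (some p.1), PySem.List.slice cl (some (p.1 + 1)) none] else []))]
  · exact PySem.List.foldl_append_eq_flatMap _ _ _
  · intro acc p _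
    split <;> simp

lemma mem_pvCandidates (cl x : List Char) :
    x ∈ pvCandidates cl ↔ x = cl ∨ ∃ (i : Nat) (h : i < cl.length),
      (cl[i] = ' ' ∨ cl[i] = '_') ∧ (x = cl.take i ∨ x = cl.drop (i + 1)) := by
  rw [pvCandidates_eq]
  simp only [List.cons_append, List.nil_append, List.mem_cons, List.mem_flatMap,
    PySem.List.mem_enumerate_iff]
  constructor
  · rintro (rfl | ⟨p, ⟨k, hk, rfl⟩, hx⟩)
    · exact Or.inl rfl
    · right
      simp only [zero_add] at hx
      by_cases hsep : (cl[k] == ' ' || cl[k] == '_') = true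
      · rw [if_pos hsep] at hx
        rw [PySem.List.slice_to_natCast] at hx
        have : ((k : Int) + 1) = ((k + 1 : Nat) : Int) := by push_cast; ring
        rw [this, PySem.List.slice_from_natCast] at hx
        refine ⟨k, hk, ?_, ?_⟩
        · simpa using hsep
        · simpa using hx
      · rw [if_neg hsep] at hx; simp at hx
  · rintro (rfl | ⟨i, h, hsep, hx⟩)
    · exact Or.inl rfl
    · right
      refine ⟨((i : Int), cl[i]), ⟨i, h, by simp⟩, ?_⟩
      have hsep' : (cl[i] == ' ' || cl[i] == '_') = true := by
        rcases hsep with h1 | h1 <;> simp [h1]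
      rw [if_pos hsep']
      rw [PySem.List.slice_to_natCast]
      have : ((i : Int) + 1) = ((i + 1 : Nat) : Int) := by push_cast; ring
      rw [this, PySem.List.slice_from_natCast]
      rcases hx with rfl | rfl <;> simp

lemma startswith_sep (cl b : List Char) (s : Char) :
    (b ++ [s]) <+: cl ↔ ∃ (i : Nat) (h : i < cl.length), cl[i] = s ∧ b = cl.take i := by
  constructor
  · rintro ⟨t, ht⟩
    subst ht
    refine ⟨b.length, by simp, ?_, ?_⟩
    · simp
    · simp
  · rintro ⟨i, h, hs, rfl⟩
    refine ⟨cl.drop (i + 1), ?_⟩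
    have hdrop : cl.drop i = cl[i] :: cl.drop (i + 1) := List.drop_eq_getElem_cons h
    calc cl.take i ++ [s] ++ cl.drop (i + 1)
        = cl.take i ++ (cl[i] :: cl.drop (i + 1)) := by rw [hs]; simp
      _ = cl.take i ++ cl.drop i := by rw [hdrop]
      _ = cl := List.take_append_drop i cl

lemma endswith_sep (cl b : List Char) (s : Char) :
    ([s] ++ b) <:+ cl ↔ ∃ (i : Nat) (h : i < cl.length), cl[i] = s ∧ b = cl.drop (i + 1) := by
  constructor
  · rintro ⟨t, ht⟩
    subst ht
    refine ⟨t.length, by simp, ?_, ?_⟩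
    · simp
    · simp [List.drop_append]
  · rintro ⟨i, h, hs, rfl⟩
    refine ⟨cl.take i, ?_⟩
    have hdrop : cl.drop i = cl[i] :: cl.drop (i + 1) := List.drop_eq_getElem_cons h
    calc cl.take i ++ ([s] ++ cl.drop (i + 1))
        = cl.take i ++ (cl[i] :: cl.drop (i + 1)) := by rw [hs]; simp
      _ = cl.take i ++ cl.drop i := by rw [hdrop]
      _ = cl := List.take_append_drop i cl

lemma cond_iff_mem (cl b : List Char) :
    (cl == b || PySem.Chars.startswith cl (b ++ [' ']) || PySem.Chars.endswith cl ([' '] ++ b)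
      || PySem.Chars.startswith cl (b ++ ['_']) || PySem.Chars.endswith cl (['_'] ++ b)) = true
    ↔ b ∈ pvCandidates cl := by
  simp only [Bool.or_eq_true, beq_iff_eq, PySem.Chars.startswith_iff, PySem.Chars.endswith_iff,
    startswith_sep, endswith_sep, mem_pvCandidates]
  constructor
  · rintro ((((h | ⟨i, hi, hs, hb⟩) | ⟨i, hi, hs, hb⟩) | ⟨i, hi, hs, hb⟩) | ⟨i, hi, hs, hb⟩)
    · exact Or.inl h.symm
    all_goals exact Or.inr ⟨i, hi, by tauto, by tauto⟩
  · rintro (rfl | ⟨i, hi, hs, hb⟩)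
    · exact Or.inl (Or.inl (Or.inl (Or.inl rfl)))
    · rcases hs with hs | hs <;> rcases hb with hb | hb
      · exact Or.inl (Or.inl (Or.inl (Or.inr ⟨i, hi, hs, hb⟩)))
      · exact Or.inl (Or.inl (Or.inr ⟨i, hi, hs, hb⟩))
      · exact Or.inl (Or.inr ⟨i, hi, hs, hb⟩)
      · exact Or.inr ⟨i, hi, hs, hb⟩

lemma any_eq_any (cl : List Char) (al : List String) :
    al.any (fun a =>
      let b := a.toList
      cl == b || PySem.Chars.startswith cl (b ++ [' ']) || PySem.Chars.endswith cl ([' '] ++ b)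
        || PySem.Chars.startswith cl (b ++ ['_']) || PySem.Chars.endswith cl (['_'] ++ b))
    = (pvCandidates cl).any (fun x =>
        PySem.Set.contains (PySem.Set.ofList (al.map String.toList)) x) := by
  rw [Bool.eq_iff_iff]
  simp only [List.any_eq_true]
  constructor
  · rintro ⟨a, ha, hcond⟩
    refine ⟨a.toList, (cond_iff_mem cl a.toList).mp hcond, ?_⟩
    simp [PySem.Set.contains, PySem.Set.mem_ofList]
    exact ⟨a, ha, rfl⟩
  · rintro ⟨x, hx, hmem⟩
    simp [PySem.Set.contains, PySem.Set.mem_ofList] at hmem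
    obtain ⟨a, ha, rfl⟩ := hmem
    exact ⟨a, ha, (cond_iff_mem cl a.toList).mpr hx⟩

lemma fold_eq_fold (columns : List String) (al : List String) :
    columns.foldl (fun found c =>
      let cl := PySem.Chars.lower (PySem.Chars.strip c.toList)
      if al.any (fun a =>
          let b := a.toList
          cl == b || PySem.Chars.startswith cl (b ++ [' ']) || PySem.Chars.endswith cl ([' '] ++ b)
            || PySem.Chars.startswith cl (b ++ ['_']) || PySem.Chars.endswith cl (['_'] ++ b))
      then found ++ [c] else found) []
    = columns.foldl (fun found c =>
      let cl := PySem.Chars.lower (PySem.Chars.strip c.toList)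
      if (pvCandidates cl).any (fun x =>
          PySem.Set.contains (PySem.Set.ofList (al.map String.toList)) x)
      then found ++ [c] else found) [] := by
  apply PySem.List.foldl_congr_mem
  intro acc c _
  simp only []
  rw [any_eq_any]

-- ===== VERDICT (by name: the statement is the Claim_ definition above) =====
theorem detect_month_columns_spec : Claim_equal_detect_month_columns := by
  intro columns aliases _
  unfold Spec_detect_month_columns detect_month_columns detect_month_columns_alt
  rcases aliases with _ | (_ | ⟨a, rest⟩)
  · exact fold_eq_fold columns DEFAULT_ALIASES
  · exact fold_eq_fold columns DEFAULT_ALIASES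
  · simpa using fold_eq_fold columns (a :: rest)
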